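-- pv_equiv track=rewrite | github.com/jimovonz/cairn | hooks/stop_hook.py | _has_negation_mismatch
-- ===== SOURCE A (Python) =====
-- NEGATION_PATTERNS = {"not", "never", "no longer", "isn't", "aren't", "shouldn't",
--                      "don't", "doesn't", "won't", "can't", "cannot", "without",
--                      "instead of", "rather than", "replaced", "removed", "deprecated"}
--
-- DIRECTIONAL_PAIRS = [
--     ("increase", "decrease"), ("enable", "disable"), ("add", "remove"),
--     ("use", "avoid"), ("prefer", "avoid"), ("include", "exclude"),
--     ("allow", "block"), ("accept", "reject"), ("start", "stop"),
--     ("upgrade", "downgrade"), ("required", "optional"),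
-- ]
--
-- def _has_negation_mismatch(text_a, text_b):
--     """Lightweight heuristic: check if one text negates or directionally contradicts the other."""
--     words_a = set(text_a.lower().split())
--     words_b = set(text_b.lower().split())
--
--     # Check negation word mismatch
--     neg_a = words_a & NEGATION_PATTERNS
--     neg_b = words_b & NEGATION_PATTERNS
--     if neg_a ^ neg_b:
--         return True
--
--     # Check directional opposition
--     for pos, neg in DIRECTIONAL_PAIRS:
--         if (pos in words_a and neg in words_b) or (neg in words_a and pos in words_b):
--             return True
--
--     return False
-- ===== SOURCE B (Python) =====
-- NEGATION_PATTERNS = {"not", "never", "no longer", "isn't", "aren't", "shouldn't",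
--                      "don't", "doesn't", "won't", "can't", "cannot", "without",
--                      "instead of", "rather than", "replaced", "removed", "deprecated"}
--
-- DIRECTIONAL_PAIRS = [
--     ("increase", "decrease"), ("enable", "disable"), ("add", "remove"),
--     ("use", "avoid"), ("prefer", "avoid"), ("include", "exclude"),
--     ("allow", "block"), ("accept", "reject"), ("start", "stop"),
--     ("upgrade", "downgrade"), ("required", "optional"),
-- ]
--
-- # Word -> set of its directional opposites, precomputed once from DIRECTIONAL_PAIRS
-- # ('avoid' maps to {'use', 'prefer'}).
-- _OPPOSITES = {}
-- for _pos, _neg in DIRECTIONAL_PAIRS: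
--     _OPPOSITES.setdefault(_pos, set()).add(_neg)
--     _OPPOSITES.setdefault(_neg, set()).add(_pos)
--
--
-- def _has_negation_mismatch(text_a, text_b):
--     """Lightweight heuristic: check if one text negates or directionally contradicts the other."""
--     words_a = set(text_a.lower().split())
--     words_b = set(text_b.lower().split())
--
--     # Negation mismatch: some negation word appears in exactly one of the texts.
--     for neg in NEGATION_PATTERNS:
--         if (neg in words_a) != (neg in words_b):
--             return True
--
--     # Directional opposition: walk the words of text_a, look up their opposites.
--     for word in words_a:
--         opposites = _OPPOSITES.get(word)
--         if opposites is not None and not opposites.isdisjoint(words_b):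
--             return True
--
--     return False
-- ===== Notes on version B (the rewrite author's own statement) =====
-- stated objective: alternative
-- what changed: The directional check now iterates over the words of text_a and looks each word up in a dict (built once from DIRECTIONAL_PAIRS) mapping a word to the set of its opposites, instead of scanning the fixed pair list against both word sets; the negation check becomes a direct per-pattern membership-xor scan instead of building two intersection sets and testing their symmetric difference.
import Mathlib
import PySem

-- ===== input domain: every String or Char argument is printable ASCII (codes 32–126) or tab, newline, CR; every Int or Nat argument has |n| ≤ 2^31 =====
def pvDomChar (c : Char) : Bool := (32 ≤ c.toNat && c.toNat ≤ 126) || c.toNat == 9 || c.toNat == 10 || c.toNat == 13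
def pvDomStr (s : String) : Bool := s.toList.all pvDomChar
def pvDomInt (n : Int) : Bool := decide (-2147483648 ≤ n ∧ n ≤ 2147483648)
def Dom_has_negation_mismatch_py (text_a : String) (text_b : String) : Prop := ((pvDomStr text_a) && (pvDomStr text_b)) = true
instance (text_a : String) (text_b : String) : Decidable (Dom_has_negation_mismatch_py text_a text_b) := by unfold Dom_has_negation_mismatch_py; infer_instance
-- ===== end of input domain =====

-- B replaces A's fixed-pair directional scan by a precomputed word→opposites dictionary
-- traversed over the first text's words, and A's symmetric-difference negation test by a
-- per-pattern membership-xor scan (objective: alternative decomposition, same cost).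

-- ===== PORT A =====
def pvNegList : List String :=
  ["not", "never", "no longer", "isn't", "aren't", "shouldn't",
   "don't", "doesn't", "won't", "can't", "cannot", "without",
   "instead of", "rather than", "replaced", "removed", "deprecated"]

-- NEGATION_PATTERNS (a Python set; only membership/intersection is taken, so order never matters)
def pvNegSet : PySem.Set String := PySem.Set.ofList pvNegList

def pvPairs : List (String × String) :=
  [("increase", "decrease"), ("enable", "disable"), ("add", "remove"),
   ("use", "avoid"), ("prefer", "avoid"), ("include", "exclude"),
   ("allow", "block"), ("accept", "reject"), ("start", "stop"),
   ("upgrade", "downgrade"), ("required", "optional")]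

def has_negation_mismatch_py (text_a : String) (text_b : String) : Bool :=
  let words_a : PySem.Set String := PySem.Set.ofList (PySem.Str.split₀ (PySem.Str.lower text_a))
  let words_b : PySem.Set String := PySem.Set.ofList (PySem.Str.split₀ (PySem.Str.lower text_b))
  let neg_a := PySem.Set.inter words_a pvNegSet
  let neg_b := PySem.Set.inter words_b pvNegSet
  if !(PySem.Set.symmDiff neg_a neg_b).isEmpty then true
  else
    pvPairs.any (fun pn =>
      (PySem.Set.contains words_a pn.1 && PySem.Set.contains words_b pn.2) ||
      (PySem.Set.contains words_a pn.2 && PySem.Set.contains words_b pn.1))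

-- ===== PORT B =====
-- _OPPOSITES: word → set of its directional opposites, built once from DIRECTIONAL_PAIRS
-- (setdefault(..., set()).add(...) in both directions)
def pvOpposites : PySem.Dict String (PySem.Set String) :=
  pvPairs.foldl (fun d pn =>
    let d := d.insert pn.1 (PySem.Set.add (d.getD pn.1 PySem.Set.empty) pn.2)
    d.insert pn.2 (PySem.Set.add (d.getD pn.2 PySem.Set.empty) pn.1)) PySem.Dict.empty

def has_negation_mismatch_py_alt (text_a : String) (text_b : String) : Bool :=
  let words_a : PySem.Set String := PySem.Set.ofList (PySem.Str.split₀ (PySem.Str.lower text_a))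
  let words_b : PySem.Set String := PySem.Set.ofList (PySem.Str.split₀ (PySem.Str.lower text_b))
  if pvNegList.any (fun neg => PySem.Set.contains words_a neg != PySem.Set.contains words_b neg) then
    true
  else
    words_a.any (fun word =>
      match pvOpposites.get? word with
      | some opposites => !(PySem.Set.isdisjoint opposites words_b)
      | none => false)

-- ===== PRECONDITION & SPEC =====
def Spec_has_negation_mismatch_py (text_a : String) (text_b : String) (out : Bool) : Prop := out = has_negation_mismatch_py_alt text_a text_b
instance (text_a : String) (text_b : String) (out : Bool) : Decidable (Spec_has_negation_mismatch_py text_a text_b out) := by unfold Spec_has_negation_mismatch_py; infer_instance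

-- ===== CLAIM (what is proved, stated in full; the proofs are below) =====
def Claim_equal_has_negation_mismatch_py : Prop := ∀ (text_a : String) (text_b : String), Dom_has_negation_mismatch_py text_a text_b → Spec_has_negation_mismatch_py text_a text_b (has_negation_mismatch_py text_a text_b)

-- ===== LEMMAS AND PROOFS =====

-- the two negation tests agree on any two word lists
lemma pv_neg_eq (wa wb : List String) :
    (!(PySem.Set.symmDiff (PySem.Set.inter wa pvNegSet) (PySem.Set.inter wb pvNegSet)).isEmpty) =
      pvNegList.any (fun neg => PySem.Set.contains wa neg != PySem.Set.contains wb neg) := by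
  rw [Bool.eq_iff_iff]
  simp only [Bool.not_eq_eq_eq_not, Bool.not_true, List.isEmpty_eq_false_iff_exists_mem,
    List.any_eq_true, PySem.Set.contains, bne_iff_ne, ne_eq,
    PySem.Set.mem_symmDiff, PySem.Set.mem_inter, PySem.Set.mem_ofList, pvNegSet]
  constructor
  · rintro ⟨x, hx⟩
    refine ⟨x, by tauto, ?_⟩
    by_cases ha : x ∈ wa <;> by_cases hb : x ∈ wb <;> simp_all
  · rintro ⟨x, hn, hx⟩
    refine ⟨x, ?_⟩
    by_cases ha : x ∈ wa <;> by_cases hb : x ∈ wb <;> simp_all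

-- the two directional tests agree on any two word lists
set_option maxHeartbeats 1000000 in
lemma pv_dir_eq (wa wb : List String) :
    (pvPairs.any (fun pn =>
      (PySem.Set.contains wa pn.1 && PySem.Set.contains wb pn.2) ||
      (PySem.Set.contains wa pn.2 && PySem.Set.contains wb pn.1))) =
    (wa.any (fun word =>
      match pvOpposites.get? word with
      | some opposites => !(PySem.Set.isdisjoint opposites wb)
      | none => false)) := by
  have hOpp : pvOpposites = ⟨[("increase", ["decrease"]),
    ("decrease", ["increase"]),
    ("enable", ["disable"]),
    ("disable", ["enable"]),
    ("add", ["remove"]),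
    ("remove", ["add"]),
    ("use", ["avoid"]),
    ("avoid", ["use", "prefer"]),
    ("prefer", ["avoid"]),
    ("include", ["exclude"]),
    ("exclude", ["include"]),
    ("allow", ["block"]),
    ("block", ["allow"]),
    ("accept", ["reject"]),
    ("reject", ["accept"]),
    ("start", ["stop"]),
    ("stop", ["start"]),
    ("upgrade", ["downgrade"]),
    ("downgrade", ["upgrade"]),
    ("required", ["optional"]),
    ("optional", ["required"])]⟩ := rfl
  rw [Bool.eq_iff_iff, List.any_eq_true, List.any_eq_true]
  constructor
  · rintro ⟨pn, hpn, hf⟩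
    simp only [pvPairs, List.mem_cons, List.not_mem_nil, or_false] at hpn
    simp only [PySem.Set.contains, Bool.or_eq_true, Bool.and_eq_true, List.contains_iff_mem] at hf
    rcases hpn with rfl|rfl|rfl|rfl|rfl|rfl|rfl|rfl|rfl|rfl|rfl <;>
      rcases hf with ⟨ha, hb⟩ | ⟨ha, hb⟩ <;>
        (refine ⟨_, ha, ?_⟩;
         rw [hOpp];
         simp [PySem.Dict.get?_mk_cons, PySem.Set.isdisjoint, hb])
  · rintro ⟨w, hw, hg⟩
    rcases e : pvOpposites.get? w with _ | os <;> rw [e] at hg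
    · simp at hg
    · have hm := PySem.Dict.mem_items_of_get?_eq_some pvOpposites e
      rw [hOpp] at hm
      simp only [List.mem_cons, List.not_mem_nil, or_false, Prod.mk.injEq] at hm
      rcases hm with ⟨rfl, rfl⟩|⟨rfl, rfl⟩|⟨rfl, rfl⟩|⟨rfl, rfl⟩|⟨rfl, rfl⟩|⟨rfl, rfl⟩|⟨rfl, rfl⟩|⟨rfl, rfl⟩|⟨rfl, rfl⟩|⟨rfl, rfl⟩|⟨rfl, rfl⟩|⟨rfl, rfl⟩|⟨rfl, rfl⟩|⟨rfl, rfl⟩|⟨rfl, rfl⟩|⟨rfl, rfl⟩|⟨rfl, rfl⟩|⟨rfl, rfl⟩|⟨rfl, rfl⟩|⟨rfl, rfl⟩|⟨rfl, rfl⟩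
      · simp [PySem.Set.isdisjoint] at hg
        exact ⟨("increase", "decrease"), by simp [pvPairs], by simp [PySem.Set.contains, hw, hg]⟩
      · simp [PySem.Set.isdisjoint] at hg
        exact ⟨("increase", "decrease"), by simp [pvPairs], by simp [PySem.Set.contains, hw, hg]⟩
      · simp [PySem.Set.isdisjoint] at hg
        exact ⟨("enable", "disable"), by simp [pvPairs], by simp [PySem.Set.contains, hw, hg]⟩
      · simp [PySem.Set.isdisjoint] at hg
        exact ⟨("enable", "disable"), by simp [pvPairs], by simp [PySem.Set.contains, hw, hg]⟩
      · simp [PySem.Set.isdisjoint] at hg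
        exact ⟨("add", "remove"), by simp [pvPairs], by simp [PySem.Set.contains, hw, hg]⟩
      · simp [PySem.Set.isdisjoint] at hg
        exact ⟨("add", "remove"), by simp [pvPairs], by simp [PySem.Set.contains, hw, hg]⟩
      · simp [PySem.Set.isdisjoint] at hg
        exact ⟨("use", "avoid"), by simp [pvPairs], by simp [PySem.Set.contains, hw, hg]⟩
      · simp [PySem.Set.isdisjoint] at hg
        rcases hg with hg | hg
        · exact ⟨("use", "avoid"), by simp [pvPairs], by simp [PySem.Set.contains, hw, hg]⟩
        · exact ⟨("prefer", "avoid"), by simp [pvPairs], by simp [PySem.Set.contains, hw, hg]⟩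
      · simp [PySem.Set.isdisjoint] at hg
        exact ⟨("prefer", "avoid"), by simp [pvPairs], by simp [PySem.Set.contains, hw, hg]⟩
      · simp [PySem.Set.isdisjoint] at hg
        exact ⟨("include", "exclude"), by simp [pvPairs], by simp [PySem.Set.contains, hw, hg]⟩
      · simp [PySem.Set.isdisjoint] at hg
        exact ⟨("include", "exclude"), by simp [pvPairs], by simp [PySem.Set.contains, hw, hg]⟩
      · simp [PySem.Set.isdisjoint] at hg
        exact ⟨("allow", "block"), by simp [pvPairs], by simp [PySem.Set.contains, hw, hg]⟩
      · simp [PySem.Set.isdisjoint] at hg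
        exact ⟨("allow", "block"), by simp [pvPairs], by simp [PySem.Set.contains, hw, hg]⟩
      · simp [PySem.Set.isdisjoint] at hg
        exact ⟨("accept", "reject"), by simp [pvPairs], by simp [PySem.Set.contains, hw, hg]⟩
      · simp [PySem.Set.isdisjoint] at hg
        exact ⟨("accept", "reject"), by simp [pvPairs], by simp [PySem.Set.contains, hw, hg]⟩
      · simp [PySem.Set.isdisjoint] at hg
        exact ⟨("start", "stop"), by simp [pvPairs], by simp [PySem.Set.contains, hw, hg]⟩
      · simp [PySem.Set.isdisjoint] at hg
        exact ⟨("start", "stop"), by simp [pvPairs], by simp [PySem.Set.contains, hw, hg]⟩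
      · simp [PySem.Set.isdisjoint] at hg
        exact ⟨("upgrade", "downgrade"), by simp [pvPairs], by simp [PySem.Set.contains, hw, hg]⟩
      · simp [PySem.Set.isdisjoint] at hg
        exact ⟨("upgrade", "downgrade"), by simp [pvPairs], by simp [PySem.Set.contains, hw, hg]⟩
      · simp [PySem.Set.isdisjoint] at hg
        exact ⟨("required", "optional"), by simp [pvPairs], by simp [PySem.Set.contains, hw, hg]⟩
      · simp [PySem.Set.isdisjoint] at hg
        exact ⟨("required", "optional"), by simp [pvPairs], by simp [PySem.Set.contains, hw, hg]⟩

-- ===== VERDICT (by name: the statement is the Claim_ definition above) =====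
theorem has_negation_mismatch_py_spec : Claim_equal_has_negation_mismatch_py := by
  intro ta tb _
  unfold Spec_has_negation_mismatch_py has_negation_mismatch_py has_negation_mismatch_py_alt
  dsimp only
  rw [pv_neg_eq, pv_dir_eq]
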